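-- pv_equiv track=rewrite | github.com/Kdonghs/algorithm | 프로그래머스/Lv.2 귤고르기/동혁/귤고르기.py | solution
-- ===== SOURCE A (Python) =====
-- def solution(k, tangerine):
--     answer = 0
--
--     # 각각의 귤을 딕셔너리 형태로 치환
--     li = {}
--     for i in tangerine:
--         if i in li:
--             li[i] += 1
--         else:
--             li[i] = 1
--     # 귤이 많은 순서로 정렬
--     li = dict(sorted(li.items(), key=lambda x: x[1], reverse=True))
--
--     # 많은 순서대로 귤 선택
--     for i in li:
--         if k <= 0:
--             return answer
--         k -= li[i]
--         answer += 1
--     return answer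
-- ===== SOURCE B (Python) =====
-- def solution(k, tangerine):
--     # frequency of each tangerine size
--     freq = {}
--     for t in tangerine:
--         freq[t] = freq.get(t, 0) + 1
--     # histogram: how many sizes have a given frequency
--     hist = {}
--     for c in freq.values():
--         hist[c] = hist.get(c, 0) + 1
--     # consume frequencies from the largest down (counting-sort style, no comparison sort)
--     answer = 0
--     for c in range(max(hist, default=0), 0, -1):
--         for _ in range(hist.get(c, 0)):
--             if k <= 0:
--                 return answer
--             k -= c
--             answer += 1
--     return answer
-- ===== Notes on version B (the rewrite author's own statement) =====
-- stated objective: faster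
-- what changed: Replaces the comparison sort of the frequency dict by a counting-sort-style descending pass: a histogram of frequency values is built and frequencies are consumed from the maximum down via range(max,0,-1), so no sorted() call remains.
import Mathlib
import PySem

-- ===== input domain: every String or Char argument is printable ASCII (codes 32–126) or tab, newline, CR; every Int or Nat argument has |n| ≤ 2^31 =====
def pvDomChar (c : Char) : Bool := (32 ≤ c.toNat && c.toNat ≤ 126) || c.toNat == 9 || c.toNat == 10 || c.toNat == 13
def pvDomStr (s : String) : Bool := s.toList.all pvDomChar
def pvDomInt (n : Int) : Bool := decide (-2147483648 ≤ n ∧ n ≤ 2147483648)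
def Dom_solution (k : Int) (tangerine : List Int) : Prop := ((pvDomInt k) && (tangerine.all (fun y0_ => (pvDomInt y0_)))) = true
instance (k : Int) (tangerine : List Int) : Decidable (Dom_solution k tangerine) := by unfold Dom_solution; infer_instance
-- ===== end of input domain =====

-- B replaces A's comparison sort of the frequency dict by a counting-sort-style descending
-- pass over a histogram of frequency values (objective: alternative algorithm, same result).

-- ===== PORT A =====
-- 'for i in li: …' with an early return; li[i] is a plain lookup (i is a key of li, so KeyError
-- is impossible and getD 0 is exact there)
def solutionLoop (li : PySem.Dict Int Int) (k answer : Int) : List Int → Int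
  | [] => answer
  | i :: rest =>
    if k ≤ 0 then answer
    else solutionLoop li (k - li.getD i 0) (answer + 1) rest

def solution (k : Int) (tangerine : List Int) : Int :=
  let li : PySem.Dict Int Int :=
    tangerine.foldl
      (fun d i => if d.contains i then d.modify i 0 (· + 1) else d.insert i 1)
      PySem.Dict.empty
  let li2 : PySem.Dict Int Int :=
    PySem.Dict.ofList (PySem.List.sorted li.items (fun p => p.2) true)
  solutionLoop li2 k 0 li2.keys

-- ===== PORT B =====
-- inner 'for _ in range(hist.get(c, 0)): …' ; .inl = early return with the answer,
-- .inr = fall through with the updated (k, answer)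
def altInner (c : Int) (k ans : Int) : Nat → Int ⊕ (Int × Int)
  | 0 => .inr (k, ans)
  | n + 1 => if k ≤ 0 then .inl ans else altInner c (k - c) (ans + 1) n

def altOuter (hist : PySem.Dict Int Int) (k ans : Int) : List Int → Int
  | [] => ans
  | c :: rest =>
    match altInner c k ans (hist.getD c 0).toNat with
    | .inl a => a
    | .inr (k', a') => altOuter hist k' a' rest

def solution_alt (k : Int) (tangerine : List Int) : Int :=
  let freq : PySem.Dict Int Int :=
    tangerine.foldl (fun d t => d.insert t (d.getD t 0 + 1)) PySem.Dict.empty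
  let hist : PySem.Dict Int Int :=
    freq.values.foldl (fun d c => d.insert c (d.getD c 0 + 1)) PySem.Dict.empty
  altOuter hist k 0
    (PySem.List.pyRange (PySem.List.maxD hist.keys (fun x => x) 0) 0 (-1))

-- ===== PRECONDITION & SPEC =====
def Spec_solution (k : Int) (tangerine : List Int) (out : Int) : Prop := out = solution_alt k tangerine
instance (k : Int) (tangerine : List Int) (out : Int) : Decidable (Spec_solution k tangerine out) := by unfold Spec_solution; infer_instance

-- ===== CLAIM (what is proved, stated in full; the proofs are below) =====
def Claim_equal_solution : Prop := ∀ (k : Int) (tangerine : List Int), Dom_solution k tangerine → Spec_solution k tangerine (solution k tangerine)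

-- ===== LEMMAS AND PROOFS =====

-- the common core of both loops: consume counts in order, early exit when k ≤ 0
def consume : Int → Int → List Int → Int
  | _, ans, [] => ans
  | k, ans, c :: rest => if k ≤ 0 then ans else consume (k - c) (ans + 1) rest

-- A's counting loop is Counter
lemma lA_eq_counter (t : List Int) :
    t.foldl (fun d i => if d.contains i then d.modify i 0 (· + 1) else d.insert i 1)
      PySem.Dict.empty = PySem.Dict.counter t := by
  rw [PySem.Dict.counter_eq_foldl]
  apply PySem.List.foldl_congr_mem
  intro d i _
  by_cases h : d.contains i
  · simp [h, PySem.Dict.modify]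
  · simp [h, PySem.Dict.modify, PySem.Dict.getD_of_not_contains d 0 (by simpa using h)]

-- B's two counting loops are Counters
lemma lB_eq_counter (t : List Int) :
    t.foldl (fun d x => d.insert x (d.getD x 0 + 1)) PySem.Dict.empty
      = PySem.Dict.counter t :=
  PySem.Dict.foldl_insert_getD_add_one_eq_counter t

-- A's key loop over a dict with Nodup keys is `consume` over the corresponding values
lemma loopA_eq_consume (d : PySem.Dict Int Int) (hnd : d.keys.Nodup) :
    ∀ (l : List (Int × Int)) (k ans : Int), (∀ p ∈ l, p ∈ d.items) →
      solutionLoop d k ans (l.map Prod.fst) = consume k ans (l.map Prod.snd) := by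
  intro l
  induction l with
  | nil => intro k ans _; rfl
  | cons p rest ih =>
    intro k ans h
    simp only [List.map_cons, solutionLoop, consume]
    rw [PySem.Dict.getD_of_mem_items d (h p (by simp)) hnd]
    split_ifs with hk
    · rfl
    · exact ih _ _ (fun q hq => h q (by simp [hq]))

-- B's inner loop vs `consume` on a replicate block
lemma inner_eq_consume (c : Int) :
    ∀ (n : Nat) (k ans : Int) (rest : List Int),
      consume k ans (List.replicate n c ++ rest) =
        (match altInner c k ans n with
         | .inl a => a
         | .inr (k', a') => consume k' a' rest) := by
  intro n
  induction n with
  | zero => intro k ans rest; rfl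
  | succ n ih =>
    intro k ans rest
    simp only [List.replicate_succ, List.cons_append, consume, altInner]
    split_ifs with hk
    · rfl
    · exact ih _ _ _

-- B's outer loop is `consume` over the concatenation of the replicate blocks
lemma outer_eq_consume (hist : PySem.Dict Int Int) :
    ∀ (l : List Int) (k ans : Int),
      altOuter hist k ans l =
        consume k ans (l.flatMap fun c => List.replicate (hist.getD c 0).toNat c) := by
  intro l
  induction l with
  | nil => intro k ans; rfl
  | cons c rest ih =>
    intro k ans
    simp only [List.flatMap_cons, altOuter]
    rw [inner_eq_consume]
    cases altInner c k ans (hist.getD c 0).toNat with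
    | inl a => rfl
    | inr p => exact ih _ _

-- counting elements of the blocked list
lemma count_flatMap_replicate (n : Int → Nat) (v : Int) :
    ∀ (l : List Int), l.Nodup →
      (l.flatMap fun c => List.replicate (n c) c).count v = if v ∈ l then n v else 0 := by
  intro l
  induction l with
  | nil => intro _; rfl
  | cons c rest ih =>
    intro hnd
    rw [List.nodup_cons] at hnd
    simp only [List.flatMap_cons, List.count_append, List.count_replicate, ih hnd.2]
    by_cases hc : c = v
    · subst hc
      simp [hnd.1]
    · simp [hc, Ne.symm hc]

-- descending range, explicitly
lemma pyRange_down (m : Int) (hm : 0 ≤ m) :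
    PySem.List.pyRange m 0 (-1) = (List.range m.toNat).map (fun (j : Nat) => m - (j : Int)) := by
  simp only [PySem.List.pyRange]
  rcases eq_or_lt_of_le hm with h|h
  · simp [← h]
  · have h0 : ¬ (-1 : Int) = 0 := by norm_num
    have h1 : ¬ (0:Int) < -1 := by norm_num
    simp only [if_neg h0, if_neg h1, h, if_pos]
    have h2 : (m - 0 + -(-1) - 1) / -(-1) = m := by
      have h3 : m - 0 + -(-1) - 1 = m := by ring
      rw [h3]; norm_num
    rw [h2]
    exact List.map_congr_left (fun a _ => by ring)

lemma mem_pyRange_down (m v : Int) (hm : 0 ≤ m) :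
    v ∈ PySem.List.pyRange m 0 (-1) ↔ 1 ≤ v ∧ v ≤ m := by
  rw [pyRange_down m hm]
  simp only [List.mem_map, List.mem_range]
  constructor
  · rintro ⟨j, hj, rfl⟩; omega
  · intro ⟨h1, h2⟩; exact ⟨(m - v).toNat, by omega, by omega⟩

lemma nodup_pyRange_down (m : Int) (hm : 0 ≤ m) :
    (PySem.List.pyRange m 0 (-1)).Nodup := by
  rw [pyRange_down m hm]
  exact List.Nodup.map (fun a b h => by omega) (List.nodup_range)

lemma pairwise_gt_pyRange_down (m : Int) (hm : 0 ≤ m) :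
    (PySem.List.pyRange m 0 (-1)).Pairwise (fun a b => b < a) := by
  rw [pyRange_down m hm]
  rw [List.pairwise_map]
  exact List.pairwise_lt_range.imp (fun h => by omega)

-- constant blocks in strictly descending order are nonincreasing
lemma flatMap_replicate_pairwise (n : Int → Nat) :
    ∀ (l : List Int), l.Pairwise (fun a b => b < a) →
      (l.flatMap fun c => List.replicate (n c) c).Pairwise (fun a b => b ≤ a) := by
  intro l
  induction l with
  | nil => intro _; simp
  | cons c rest ih =>
    intro hp
    rw [List.pairwise_cons] at hp
    simp only [List.flatMap_cons]
    rw [List.pairwise_append]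
    refine ⟨List.pairwise_replicate.mpr (Or.inr le_rfl), ih hp.2, ?_⟩
    intro a ha b hb
    obtain ⟨c', hc', hb'⟩ := List.mem_flatMap.mp hb
    rw [List.eq_of_mem_replicate ha, List.eq_of_mem_replicate hb']
    exact le_of_lt (hp.1 c' hc')

-- the two count sequences coincide
lemma counts_eq (t : List Int) :
    ((PySem.List.sorted (PySem.Dict.counter t).items (fun p => p.2) true).map Prod.snd)
      = ((PySem.List.pyRange
            (PySem.List.maxD (PySem.Dict.counter (PySem.Dict.counter t).values).keys (fun x => x) 0) 0 (-1)).flatMap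
          fun c => List.replicate (((PySem.Dict.counter (PySem.Dict.counter t).values).getD c 0).toNat) c) := by
  set values := (PySem.Dict.counter t).values with hv
  set hist := PySem.Dict.counter values with hh
  set m := PySem.List.maxD hist.keys (fun x => x) 0 with hmdef
  have hvalmem : ∀ v ∈ values, 1 ≤ v := by
    intro v hvv
    rw [hv, PySem.Dict.values, PySem.Dict.items_counter, List.map_map] at hvv
    obtain ⟨kk, hk, rfl⟩ := List.mem_map.mp hvv
    have hkt : kk ∈ t := (PySem.Set.mem_ofList t kk).mp hk
    have := List.count_pos_iff.mpr hkt
    simp only [Function.comp]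
    omega
  have hvm : ∀ v ∈ values, v ≤ m := by
    intro v hvv
    have hk : v ∈ hist.keys := by
      rw [hh, PySem.Dict.keys_counter]
      exact (PySem.Set.mem_ofList values v).mpr hvv
    exact PySem.List.le_maxD_id hist.keys 0 v hk
  have hm0 : 0 ≤ m := by
    rw [hmdef]
    cases hmax : PySem.List.max? hist.keys (fun x => x) with
    | none => simp [PySem.List.maxD, hmax]
    | some m' =>
      have hm' : m' ∈ hist.keys := PySem.List.max?_mem hmax
      rw [hh, PySem.Dict.keys_counter, PySem.Set.mem_ofList] at hm'
      have := hvalmem m' hm'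
      simp only [PySem.List.maxD, hmax, Option.getD_some]
      omega
  -- B side is a permutation of values
  have hcount : ∀ v : Int,
      ((PySem.List.pyRange m 0 (-1)).flatMap
        fun c => List.replicate ((hist.getD c 0).toNat) c).count v = values.count v := by
    intro v
    have := count_flatMap_replicate (fun c => (hist.getD c 0).toNat) v
      (PySem.List.pyRange m 0 (-1)) (nodup_pyRange_down m hm0)
    rw [this]
    by_cases hvr : v ∈ PySem.List.pyRange m 0 (-1)
    · simp only [hvr, if_pos, hh, PySem.Dict.getD_counter, Int.toNat_natCast]
    · rw [if_neg hvr]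
      rcases List.count_eq_zero.mpr (fun hvv : v ∈ values =>
        hvr ((mem_pyRange_down m v hm0).mpr ⟨hvalmem v hvv, hvm v hvv⟩)) with h
      omega
  have hpermB : ((PySem.List.pyRange m 0 (-1)).flatMap
      fun c => List.replicate ((hist.getD c 0).toNat) c).Perm values :=
    List.perm_iff_count.mpr (fun a => hcount a)
  have hpermA : ((PySem.List.sorted (PySem.Dict.counter t).items (fun p => p.2) true).map Prod.snd).Perm values := by
    rw [hv, PySem.Dict.values]
    exact (PySem.List.sorted_perm (PySem.Dict.counter t).items (fun p => p.2) true).map _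
  have hpairA : ((PySem.List.sorted (PySem.Dict.counter t).items (fun p => p.2) true).map Prod.snd).Pairwise
      (fun a b => b ≤ a) := by
    rw [List.pairwise_map]
    exact PySem.List.sorted_pairwise_rev (PySem.Dict.counter t).items (fun p => p.2)
  have hpairB := flatMap_replicate_pairwise (fun c => (hist.getD c 0).toNat)
    (PySem.List.pyRange m 0 (-1)) (pairwise_gt_pyRange_down m hm0)
  exact List.Perm.eq_of_pairwise (fun a b _ _ h1 h2 => le_antisymm h2 h1) hpairA hpairB
    (hpermA.trans hpermB.symm)

-- ===== VERDICT (by name: the statement is the Claim_ definition above) =====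
theorem solution_spec : Claim_equal_solution := by
  intro k t _
  unfold Spec_solution
  show solution k t = solution_alt k t
  simp only [solution, solution_alt, lA_eq_counter, lB_eq_counter]
  set S := PySem.List.sorted (PySem.Dict.counter t).items (fun p => p.2) true with hSdef
  have hSnodup : (S.map Prod.fst).Nodup := by
    have hperm : S.Perm (PySem.Dict.counter t).items := PySem.List.sorted_perm _ _ _
    have hkn : ((PySem.Dict.counter t).items.map Prod.fst).Nodup := PySem.Dict.nodup_keys_counter t
    exact (hperm.map Prod.fst).symm.nodup hkn
  have hitems : (PySem.Dict.ofList S).items = S := by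
    show (List.foldl (fun d p => d.insert p.1 p.2) PySem.Dict.empty S).items = S
    rw [PySem.Dict.items_foldl_insert_fresh S Prod.fst Prod.snd PySem.Dict.empty
        (fun a _ => PySem.Dict.contains_empty a.1) hSnodup]
    simp [show PySem.Dict.empty.items = ([] : List (Int × Int)) from rfl]
  have hkeys : (PySem.Dict.ofList S).keys = S.map Prod.fst := by
    show (PySem.Dict.ofList S).items.map Prod.fst = S.map Prod.fst
    rw [hitems]
  rw [hkeys,
    loopA_eq_consume _ (by rw [hkeys]; exact hSnodup) S k 0 (fun p hp => by rw [hitems]; exact hp),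
    outer_eq_consume]
  exact congrArg (fun l => consume k 0 l) (counts_eq t)
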